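-- pv_equiv track=rewrite | github.com/artkpv/code-dojo | _other/nearest-neighbors/pr.not_greater_t.py | find_nn
-- ===== SOURCE A (Python) =====
-- def find_nn(a, t, k):
--     j = -1
--     for i in range(len(a)):
--         if j > -1 and j < i - k:
--             j = -1
--         if a[i] <= t:
--             if j != -1:
--                 return [a[j], a[i]]
--             j = i
--     return []
-- ===== SOURCE B (Python) =====
-- def find_nn(a, t, k):
--     idx = [i for i, x in enumerate(a) if x <= t]
--     for p, q in zip(idx, idx[1:]):
--         if q - p <= k:
--             return [a[p], a[q]]
--     return []
-- ===== Notes on version B (the rewrite author's own statement) =====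
-- stated objective: simpler
-- what changed: Replaces the sliding 'last qualifying index' state variable with an explicit list of qualifying indices followed by a scan over consecutive index pairs checking the gap.
import Mathlib
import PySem

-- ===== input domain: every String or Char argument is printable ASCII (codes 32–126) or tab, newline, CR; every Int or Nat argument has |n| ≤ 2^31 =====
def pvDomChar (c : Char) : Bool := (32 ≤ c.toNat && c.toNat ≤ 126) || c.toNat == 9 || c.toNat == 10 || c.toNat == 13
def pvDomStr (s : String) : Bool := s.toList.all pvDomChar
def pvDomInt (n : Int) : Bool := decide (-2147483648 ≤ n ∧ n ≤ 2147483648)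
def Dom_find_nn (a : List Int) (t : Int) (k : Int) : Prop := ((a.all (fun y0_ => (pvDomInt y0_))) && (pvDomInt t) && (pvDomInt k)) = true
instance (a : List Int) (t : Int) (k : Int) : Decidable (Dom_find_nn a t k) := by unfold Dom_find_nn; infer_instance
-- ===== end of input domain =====

-- B replaces A's sliding 'last qualifying index within window' state variable by an explicit
-- list of all qualifying indices plus a scan over its consecutive pairs (objective: simpler).

-- ===== PORT A =====
-- the for-loop over range(len(a)) with mutable state j and an early return;
-- a.getD i 0 is exact for a[i] since every i drawn from the range is in bounds
def findA_loop (a : List Int) (t : Int) (k : Int) : List Nat → Int → List Int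
  | [], _ => []
  | i :: rest, j =>
    let j1 := if j > -1 ∧ j < (i : Int) - k then -1 else j
    if a.getD i 0 ≤ t then
      if j1 ≠ -1 then [a.getD j1.toNat 0, a.getD i 0]
      else findA_loop a t k rest (i : Int)
    else findA_loop a t k rest j1

def find_nn (a : List Int) (t : Int) (k : Int) : List Int :=
  findA_loop a t k (List.range a.length) (-1)

-- ===== PORT B =====
-- [i for i, x in enumerate(a) if x <= t]
def qualIdx (t : Int) : List Int → Nat → List Nat
  | [], _ => []
  | x :: xs, i => if x ≤ t then i :: qualIdx t xs (i + 1) else qualIdx t xs (i + 1)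

-- the for-loop over zip(idx, idx[1:])
def altScan (a : List Int) (k : Int) : List (Nat × Nat) → List Int
  | [] => []
  | (p, q) :: rest =>
    if (q : Int) - (p : Int) ≤ k then [a.getD p 0, a.getD q 0] else altScan a k rest

def find_nn_alt (a : List Int) (t : Int) (k : Int) : List Int :=
  let idx := qualIdx t a 0
  altScan a k (idx.zip idx.tail)

-- ===== PRECONDITION & SPEC =====
def Spec_find_nn (a : List Int) (t : Int) (k : Int) (out : List Int) : Prop := out = find_nn_alt a t k
instance (a : List Int) (t : Int) (k : Int) (out : List Int) : Decidable (Spec_find_nn a t k out) := by unfold Spec_find_nn; infer_instance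

-- ===== CLAIM (what is proved, stated in full; the proofs are below) =====
def Claim_equal_find_nn : Prop := ∀ (a : List Int) (t : Int) (k : Int), Dom_find_nn a t k → Spec_find_nn a t k (find_nn a t k)

-- ===== LEMMAS AND PROOFS =====

-- every index produced by qualIdx starting at n is ≥ n
theorem qualIdx_ge (t : Int) : ∀ (xs : List Int) (n q : Nat), q ∈ qualIdx t xs n → n ≤ q := by
  intro xs
  induction xs with
  | nil => intro n q h; simp [qualIdx] at h
  | cons x rest ih =>
    intro n q h
    simp only [qualIdx] at h
    split at h
    · rcases List.mem_cons.mp h with rfl | h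
      · exact le_refl _
      · exact Nat.le_of_succ_le (ih (n + 1) q h)
    · exact Nat.le_of_succ_le (ih (n + 1) q h)

-- if the first pair (p, head l) fails the gap test, the scan ignores p
theorem altScan_skip (a : List Int) (k : Int) (p : Nat) (l : List Nat)
    (h : ∀ q ∈ l.head?, ¬ ((q : Int) - (p : Int) ≤ k)) :
    altScan a k ((p :: l).zip (p :: l).tail) = altScan a k (l.zip l.tail) := by
  cases l with
  | nil => rfl
  | cons q rest =>
    simp only [List.tail_cons, List.zip_cons_cons, altScan]
    rw [if_neg (h q (by simp))]

-- main loop invariant: the A-loop from index n with state j equals B's consecutive-pair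
-- scan over (j, if live) followed by the qualifying indices of the rest of the list
theorem loop_eq (a : List Int) (t : Int) (k : Int) :
    ∀ (xs : List Int) (n : Nat) (j : Int), xs = a.drop n → (j = -1 ∨ 0 ≤ j) →
    findA_loop a t k (List.range' n xs.length) j =
      altScan a k
        (let l := if j = -1 then qualIdx t xs n else j.toNat :: qualIdx t xs n
         l.zip l.tail) := by
  intro xs
  induction xs with
  | nil =>
    intro n j _ _
    simp only [qualIdx]
    split <;> simp [findA_loop, altScan]
  | cons x rest ih =>
    intro n j hx hj
    have hget : a.getD n 0 = x := by
      have h0 : (a.drop n)[0]? = some x := by rw [← hx]; rfl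
      rw [List.getElem?_drop] at h0
      simp only [Nat.add_zero] at h0
      simp [List.getD_eq_getElem?_getD, h0]
    have hrest : rest = a.drop (n + 1) := by
      have := congrArg List.tail hx
      simpa [List.tail_drop] using this
    have hlen : (x :: rest).length = rest.length + 1 := rfl
    rw [hlen, List.range'_succ]
    simp only [findA_loop, hget]
    rcases hj with rfl | h0
    · -- j = -1: never reset, stays -1
      have hj1 : (if (-1 : Int) > -1 ∧ (-1 : Int) < (n : Int) - k then (-1 : Int) else -1) = -1 := by
        split <;> rfl
      rw [hj1]
      by_cases hxt : x ≤ t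
      · rw [if_pos hxt, if_neg (by simp : ¬ ((-1 : Int) ≠ -1))]
        rw [ih (n + 1) (n : Int) hrest (Or.inr (by positivity))]
        have hnne : ((n : Int) = -1) = False := by simp
        simp only [qualIdx, if_pos hxt, hnne, if_false, if_true, Int.toNat_natCast]
      · rw [if_neg hxt, ih (n + 1) (-1) hrest (Or.inl rfl)]
        simp only [qualIdx, if_neg hxt]
    · -- 0 ≤ j
      have hjne : (j = -1) = False := by simp; omega
      by_cases hres : j > -1 ∧ j < (n : Int) - k
      · -- reset: j dies before (or at) index n
        rw [if_pos hres]
        -- on the B side the pair (j.toNat, q) fails for every possible next qualifying q ≥ n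
        have hskip : ∀ (l : List Nat), (∀ q ∈ l, n ≤ q) →
            altScan a k ((j.toNat :: l).zip (j.toNat :: l).tail) = altScan a k (l.zip l.tail) := by
          intro l hl
          apply altScan_skip
          intro q hq
          have hq' : n ≤ q := hl q (List.mem_of_mem_head? hq)
          have : (j.toNat : Int) = j := Int.toNat_of_nonneg h0
          omega
        by_cases hxt : x ≤ t
        · rw [if_pos hxt, if_neg (by simp : ¬ ((-1 : Int) ≠ -1))]
          rw [ih (n + 1) (n : Int) hrest (Or.inr (by positivity))]
          have hnne : ((n : Int) = -1) = False := by simp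
          simp only [qualIdx, if_pos hxt, hjne, hnne, if_false, Int.toNat_natCast]
          rw [hskip (n :: qualIdx t rest (n + 1))]
          intro q hq
          rcases List.mem_cons.mp hq with rfl | hq
          · exact le_refl _
          · exact Nat.le_of_succ_le (qualIdx_ge t rest (n + 1) q hq)
        · rw [if_neg hxt, ih (n + 1) (-1) hrest (Or.inl rfl)]
          simp only [qualIdx, if_neg hxt, hjne, if_false, if_true]
          rw [hskip (qualIdx t rest (n + 1))]
          intro q hq
          exact Nat.le_of_succ_le (qualIdx_ge t rest (n + 1) q hq)
      · -- no reset: j survives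
        rw [if_neg hres]
        have hjk : ¬ (j < (n : Int) - k) := by
          intro h; exact hres ⟨by omega, h⟩
        by_cases hxt : x ≤ t
        · -- return [a[j], a[n]] on both sides
          rw [if_pos hxt]
          have hne : j ≠ -1 := by omega
          rw [if_pos hne]
          simp only [qualIdx, if_pos hxt, hjne, if_false, List.tail_cons, List.zip_cons_cons,
            altScan]
          have hcond : (n : Int) - (j.toNat : Int) ≤ k := by
            have : (j.toNat : Int) = j := Int.toNat_of_nonneg h0
            omega
          rw [if_pos hcond, hget]
        · rw [if_neg hxt, ih (n + 1) j hrest (Or.inr h0)]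
          simp only [qualIdx, if_neg hxt, hjne]

-- ===== VERDICT (by name: the statement is the Claim_ definition above) =====
theorem find_nn_spec : Claim_equal_find_nn := by
  intro a t k _
  show find_nn a t k = find_nn_alt a t k
  have h := loop_eq a t k a 0 (-1) (by simp) (Or.inl rfl)
  simpa [find_nn, find_nn_alt, List.range_eq_range'] using h
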